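-- pv_equiv track=rewrite | github.com/Guo-Zhang/thera | scripts/domain_deps.py | analyze_cross_domain_calls
-- ===== SOURCE A (Python) =====
-- from typing import Any
--
-- def analyze_cross_domain_calls(
--     domain_analysis: dict[str, dict],
-- ) -> list[dict[str, Any]]:
--     """分析跨 Domain 调用"""
--     calls = []
--     domain_names = {d.lower() for d in domain_analysis.keys()}
--
--     for domain, data in domain_analysis.items():
--         for call in data.get("method_calls", []):
--             method = call.get("method", "")
--             if any(name in method.lower() for name in domain_names):
--                 calls.append({"from": domain, "to": method, "type": call.get("type")})
--
--     return calls
-- ===== SOURCE B (Python) =====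
-- def analyze_cross_domain_calls(domain_analysis):
--     """分析跨 Domain 调用"""
--     names = {d.lower() for d in domain_analysis}
--     lengths = sorted({len(n) for n in names})
--     return [
--         {"from": domain, "to": call.get("method", ""), "type": call.get("type")}
--         for domain, data in domain_analysis.items()
--         for call in data.get("method_calls", [])
--         if _mentions_domain(call.get("method", "").lower(), names, lengths)
--     ]
--
--
-- def _mentions_domain(m, names, lengths):
--     # slide a window of each domain-name length over m; one hash lookup per window
--     return any(m[i:i + L] in names for L in lengths for i in range(len(m) - L + 1))
-- ===== Notes on version B (the rewrite author's own statement) =====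
-- stated objective: alternative
-- what changed: B inverts the matching: instead of running a substring search for every domain name in every method, it hashes the lowered domain names into a set once and slides a window of each distinct name length over the lowered method, doing one set lookup per window; Pre_ excludes inputs where a matched call lacks the 'type' key, because there both programs put None in the 'type' field and the String-valued Lean model cannot represent that value.
import Mathlib
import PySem

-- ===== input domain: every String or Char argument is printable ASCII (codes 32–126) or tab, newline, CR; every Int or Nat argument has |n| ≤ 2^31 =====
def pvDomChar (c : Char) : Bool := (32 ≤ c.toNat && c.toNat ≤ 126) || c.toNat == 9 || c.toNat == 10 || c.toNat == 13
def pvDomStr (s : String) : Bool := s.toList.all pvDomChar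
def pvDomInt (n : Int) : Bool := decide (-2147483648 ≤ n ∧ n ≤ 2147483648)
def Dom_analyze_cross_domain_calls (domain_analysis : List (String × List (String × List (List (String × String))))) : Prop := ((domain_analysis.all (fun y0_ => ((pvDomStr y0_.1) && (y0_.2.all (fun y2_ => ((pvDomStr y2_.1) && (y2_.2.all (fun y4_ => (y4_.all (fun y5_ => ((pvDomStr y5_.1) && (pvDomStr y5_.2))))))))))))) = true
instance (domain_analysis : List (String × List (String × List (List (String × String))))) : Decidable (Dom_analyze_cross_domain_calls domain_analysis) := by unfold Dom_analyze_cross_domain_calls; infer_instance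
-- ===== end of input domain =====

-- B: hashes the lowered domain names into a set once and slides a window of each distinct
-- name length over the lowered method (one set lookup per window), instead of A's per-name
-- substring search; results built as one flat comprehension instead of nested appends.


-- ===== PORT A =====
-- literal port of A; `call.get("type")` (Python: None when absent) is ported as getD "type" ""
-- — Pre_ excludes the inputs where that key is read but absent, so the default is never seen.
def analyze_cross_domain_calls (domain_analysis : List (String × List (String × List (List (String × String))))) : List (List (String × String)) :=
  let dd := PySem.Dict.ofList domain_analysis
  let domain_names : PySem.Set String := PySem.Set.ofList (dd.keys.map (fun d => PySem.Str.lower d))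
  dd.items.foldl (fun calls dom_data =>
    ((PySem.Dict.ofList dom_data.2).getD "method_calls" []).foldl (fun calls call =>
      let cd := PySem.Dict.ofList call
      let method := cd.getD "method" ""
      if domain_names.any (fun name => PySem.Str.isIn name (PySem.Str.lower method)) then
        calls ++ [[("from", dom_data.1), ("to", method), ("type", cd.getD "type" "")]]
      else calls) calls) []

-- ===== PORT B =====
-- m[i:i+L] in names: one set lookup per window (Python set of strings ≙ PySem.Set over List Char)
def pvMentions (m : List Char) (names : PySem.Set (List Char)) (lengths : List Int) : Bool :=
  lengths.any (fun L =>
    (PySem.List.pyRange 0 ((m.length : Int) - L + 1) 1).any (fun i =>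
      PySem.Set.contains names (PySem.List.slice m (some i) (some (i + L)))))

def analyze_cross_domain_calls_alt (domain_analysis : List (String × List (String × List (List (String × String))))) : List (List (String × String)) :=
  let names : PySem.Set (List Char) :=
    PySem.Set.ofList ((PySem.Dict.ofList domain_analysis).keys.map (fun d => PySem.Chars.lower d.toList))
  let lengths := PySem.List.sorted (PySem.Set.ofList (names.map (fun n => (n.length : Int)))) (fun x => x) false
  (PySem.Dict.ofList domain_analysis).items.flatMap (fun dom_data =>
    (((PySem.Dict.ofList dom_data.2).getD "method_calls" []).filter (fun call =>
        pvMentions (PySem.Chars.lower ((PySem.Dict.ofList call).getD "method" "").toList) names lengths)).map (fun call =>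
      [("from", dom_data.1), ("to", (PySem.Dict.ofList call).getD "method" ""),
       ("type", (PySem.Dict.ofList call).getD "type" "")]))

-- ===== PRECONDITION & SPEC =====
-- Pre_ excludes inputs where some call whose method matches a domain name lacks a "type" key:
-- A (and B) then put Python's None in the "type" field, a value the String-typed Lean model
-- cannot represent (both Pythons agree there; the exclusion is a limit of the port's type, not of B).
def Pre_analyze_cross_domain_calls (domain_analysis : List (String × List (String × List (List (String × String))))) : Prop :=
  ((PySem.Dict.ofList domain_analysis).items.all (fun dom_data =>
    ((PySem.Dict.ofList dom_data.2).getD "method_calls" []).all (fun call =>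
      (!((domain_analysis.map (fun p => PySem.Str.lower p.1)).any (fun name =>
          PySem.Str.isIn name (PySem.Str.lower ((PySem.Dict.ofList call).getD "method" ""))))
       || (PySem.Dict.ofList call).contains "type")))) = true
instance (domain_analysis : List (String × List (String × List (List (String × String))))) : Decidable (Pre_analyze_cross_domain_calls domain_analysis) := by unfold Pre_analyze_cross_domain_calls; infer_instance

def pvWitness_analyze_cross_domain_calls : (List (String × List (String × List (List (String × String))))) :=
  [("A", [("method_calls", [[("method", "xA_run"), ("type", "call")]])]), ("B", [])]

def Spec_analyze_cross_domain_calls (domain_analysis : List (String × List (String × List (List (String × String))))) (out : List (List (String × String))) : Prop := out = analyze_cross_domain_calls_alt domain_analysis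
instance (domain_analysis : List (String × List (String × List (List (String × String))))) (out : List (List (String × String))) : Decidable (Spec_analyze_cross_domain_calls domain_analysis out) := by unfold Spec_analyze_cross_domain_calls; infer_instance

-- ===== CLAIM (what is proved, stated in full; the proofs are below) =====
def Claim_equal_analyze_cross_domain_calls : Prop := ∀ (domain_analysis : List (String × List (String × List (List (String × String))))), Dom_analyze_cross_domain_calls domain_analysis → Pre_analyze_cross_domain_calls domain_analysis → Spec_analyze_cross_domain_calls domain_analysis (analyze_cross_domain_calls domain_analysis)

-- ===== LEMMAS AND PROOFS =====

-- the windowed set lookup finds a name iff some name is an infix, given that `lengths`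
-- holds exactly the lengths of the names
lemma pvMentions_eq_any_isIn (m : List Char) (names : List (List Char)) (lengths : List Int)
    (h : ∀ L : Int, L ∈ lengths ↔ ∃ n ∈ names, (n.length : Int) = L) :
    pvMentions m names lengths = names.any (fun n => PySem.Chars.isIn n m) := by
  have hiff : (pvMentions m names lengths = true) ↔ (names.any (fun n => PySem.Chars.isIn n m) = true) := by
    simp only [pvMentions, List.any_eq_true, PySem.List.mem_pyRange_one, h,
      PySem.Set.contains_iff, PySem.Chars.isIn_iff_infix]
    constructor
    · rintro ⟨L, ⟨n0, hn0, hL⟩, i, ⟨hi0, hilt⟩, hmem⟩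
      refine ⟨_, hmem, ?_⟩
      rw [PySem.List.slice_toNat m hi0 (by omega)]
      exact ((List.take_prefix _ _).isInfix).trans ((List.drop_suffix _ _).isInfix)
    · rintro ⟨n, hn, hinf⟩
      obtain ⟨s, t, hm⟩ := hinf
      refine ⟨(n.length : Int), ⟨n, hn, rfl⟩, (s.length : Int), ⟨by positivity, ?_⟩, ?_⟩
      · have : s.length + n.length ≤ m.length := by
          rw [← hm]; simp [List.length_append]
        omega
      · rw [PySem.List.slice_toNat m (by positivity) (by positivity)]
        have h1 : ((s.length : Int)).toNat = s.length := by simp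
        have h2 : ((s.length : Int) + (n.length : Int)).toNat = s.length + n.length := by
          omega
        rw [h1, h2, ← hm, List.append_assoc, List.drop_left, Nat.add_sub_cancel_left, List.take_left]
        exact hn
  exact Bool.eq_iff_iff.mpr hiff

-- A's match test equals B's, for the concrete sets both ports build from the keys
lemma test_eq (ks : List String) (method : String) :
    (PySem.Set.ofList (ks.map (fun d => PySem.Str.lower d))).any
        (fun name => PySem.Str.isIn name (PySem.Str.lower method))
    = pvMentions (PySem.Chars.lower method.toList)
        (PySem.Set.ofList (ks.map (fun d => PySem.Chars.lower d.toList)))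
        (PySem.List.sorted (PySem.Set.ofList ((PySem.Set.ofList (ks.map (fun d => PySem.Chars.lower d.toList)) : List (List Char)).map (fun n => (n.length : Int)))) (fun x => x) false) := by
  rw [pvMentions_eq_any_isIn _ _ _ (by
    intro L
    simp [PySem.List.mem_sorted, PySem.Set.mem_ofList])]
  apply Bool.eq_iff_iff.mpr
  simp [List.any_eq_true, PySem.Set.mem_ofList, PySem.Str.isIn_eq, PySem.Str.toList_lower]

-- ===== VERDICT (by name: the statement is the Claim_ definition above) =====
theorem analyze_cross_domain_calls_spec : Claim_equal_analyze_cross_domain_calls := by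
  intro da _ _
  unfold Spec_analyze_cross_domain_calls analyze_cross_domain_calls analyze_cross_domain_calls_alt
  simp only [test_eq, PySem.List.foldl_append_if, PySem.List.foldl_append_eq_flatMap, List.nil_append]
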